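-- pv_equiv track=rewrite | github.com/ainarasp/multifreq | parallel_multifreq.py | getchunks_cont
-- ===== SOURCE A (Python) =====
-- def getchunks_cont(items, maxbaskets=3, item_count=None):
-- 	'''
-- 	generates balanced baskets from iterable, contiguous contents
-- 	provide item_count if providing a iterator that doesn't support len()
-- 	'''
-- 	item_count = item_count or len(items)
-- 	baskets = min(item_count, maxbaskets)
-- 	items = iter(items)
-- 	floor = item_count // baskets
-- 	ceiling = floor + 1
-- 	stepdown = item_count % baskets
-- 	for x_i in range(baskets):
-- 		length = ceiling if x_i < stepdown else floor
-- 		yield [items.__next__() for _ in range(length)]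
-- ===== SOURCE B (Python) =====
-- def getchunks_cont(items, maxbaskets=3, item_count=None):
-- 	'''
-- 	generates balanced baskets from iterable, contiguous contents
-- 	provide item_count if providing a iterator that doesn't support len()
-- 	'''
-- 	item_count = item_count or len(items)
-- 	baskets = min(item_count, maxbaskets)
-- 	floor, stepdown = divmod(item_count, baskets)
-- 	buf = list(items)[:item_count] if baskets > 0 else []
-- 	for i in range(baskets):
-- 		start = i * floor + min(i, stepdown)
-- 		length = floor + 1 if i < stepdown else floor
-- 		yield buf[start:start + length]
-- ===== Notes on version B (the rewrite author's own statement) =====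
-- stated objective: alternative
-- what changed: B materializes the consumed prefix once and computes each basket by index arithmetic (start_i = i*floor + min(i, stepdown)) with list slicing, instead of A's stateful iterator pulled element by element inside a nested generator.
import Mathlib
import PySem

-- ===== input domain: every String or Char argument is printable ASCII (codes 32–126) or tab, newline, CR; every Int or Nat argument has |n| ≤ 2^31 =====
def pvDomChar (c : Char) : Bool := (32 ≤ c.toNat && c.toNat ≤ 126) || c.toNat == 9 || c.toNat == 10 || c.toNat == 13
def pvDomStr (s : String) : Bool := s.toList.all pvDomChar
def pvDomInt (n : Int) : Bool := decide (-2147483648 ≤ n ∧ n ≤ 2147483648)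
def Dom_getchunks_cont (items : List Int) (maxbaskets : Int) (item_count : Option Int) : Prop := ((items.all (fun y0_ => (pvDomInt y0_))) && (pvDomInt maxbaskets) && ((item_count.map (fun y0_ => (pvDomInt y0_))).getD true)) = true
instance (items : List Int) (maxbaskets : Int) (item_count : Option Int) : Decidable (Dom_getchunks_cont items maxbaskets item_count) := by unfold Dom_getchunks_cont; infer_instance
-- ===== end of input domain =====

-- B replaces A's stateful element-by-element iterator consumption with one materialized
-- prefix and per-basket index arithmetic + slicing (alternative algorithm, same cost).


-- `item_count = item_count or len(items)` (0 and None both fall back to len(items))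
def pvEffCount (items : List Int) (item_count : Option Int) : Int :=
  match item_count with
  | some c => if c = 0 then (items.length : Int) else c
  | none => (items.length : Int)

-- ===== PORT A =====
def getchunks_cont (items : List Int) (maxbaskets : Int) (item_count : Option Int) : List (List Int) :=
  let n := pvEffCount items item_count
  let baskets := min n maxbaskets
  if baskets = 0 then []  -- guard for totality only: Python raises ZeroDivisionError here (outside Pre_)
  else
    let floor := PySem.Int.floordiv n baskets
    let ceiling := floor + 1
    let stepdown := PySem.Int.mod n baskets
    -- state: (remaining iterator as a list, baskets yielded so far)
    ((PySem.List.pyRange 0 baskets 1).foldl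
      (fun (st : List Int × List (List Int)) x_i =>
        let length := if x_i < stepdown then ceiling else floor
        (st.1.drop length.toNat, st.2 ++ [st.1.take length.toNat]))
      (items, [])).2

-- ===== PORT B =====
def getchunks_cont_alt (items : List Int) (maxbaskets : Int) (item_count : Option Int) : List (List Int) :=
  let n := pvEffCount items item_count
  let baskets := min n maxbaskets
  if baskets = 0 then []  -- guard for totality only: Python raises ZeroDivisionError here (outside Pre_)
  else
    let floor := PySem.Int.floordiv n baskets
    let stepdown := PySem.Int.mod n baskets
    let buf := if 0 < baskets then PySem.List.slice items none (some n) else []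
    (PySem.List.pyRange 0 baskets 1).map (fun i =>
      let start := i * floor + min i stepdown
      let length := if i < stepdown then floor + 1 else floor
      PySem.List.slice buf (some start) (some (start + length)))

-- ===== PRECONDITION & SPEC =====
-- Pre_ excludes exactly the inputs where A raises: effective basket count 0 (ZeroDivisionError)
-- and a positive basket count with item_count exceeding the available items (the generator's
-- __next__ fails: RuntimeError). A returns normally everywhere else.
def Pre_getchunks_cont (items : List Int) (maxbaskets : Int) (item_count : Option Int) : Prop :=
  min (pvEffCount items item_count) maxbaskets ≠ 0 ∧
  (0 < min (pvEffCount items item_count) maxbaskets → pvEffCount items item_count ≤ (items.length : Int))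
instance (items : List Int) (maxbaskets : Int) (item_count : Option Int) : Decidable (Pre_getchunks_cont items maxbaskets item_count) := by unfold Pre_getchunks_cont; infer_instance

def pvWitness_getchunks_cont : List Int × Int × Option Int := ([1, 2, 3, 4, 5], 3, none)

def Spec_getchunks_cont (items : List Int) (maxbaskets : Int) (item_count : Option Int) (out : List (List Int)) : Prop := out = getchunks_cont_alt items maxbaskets item_count
instance (items : List Int) (maxbaskets : Int) (item_count : Option Int) (out : List (List Int)) : Decidable (Spec_getchunks_cont items maxbaskets item_count out) := by unfold Spec_getchunks_cont; infer_instance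

-- ===== CLAIM (what is proved, stated in full; the proofs are below) =====
def Claim_equal_getchunks_cont : Prop := ∀ (items : List Int) (maxbaskets : Int) (item_count : Option Int), Dom_getchunks_cont items maxbaskets item_count → Pre_getchunks_cont items maxbaskets item_count → Spec_getchunks_cont items maxbaskets item_count (getchunks_cont items maxbaskets item_count)

-- ===== LEMMAS AND PROOFS =====

-- basket boundary arithmetic used only by the proofs
def pvStart (floor sd i : Int) : Int := i * floor + min i sd
def pvLen (floor sd i : Int) : Int := if i < sd then floor + 1 else floor

lemma pvStart_succ (floor sd i : Int) (hsd : 0 ≤ sd) :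
    pvStart floor sd (i + 1) = pvStart floor sd i + pvLen floor sd i := by
  unfold pvStart pvLen
  have h : (i + 1) * floor = i * floor + floor := by ring
  rw [h]
  rcases le_or_gt sd i with hc | hc
  · rw [if_neg (by omega), min_eq_right (by omega), min_eq_right (by omega)]; omega
  · rw [if_pos hc, min_eq_left (by omega), min_eq_left (by omega)]; ring

lemma pvStart_add_len_le (floor sd i b n : Int) (hfloor : 0 ≤ floor) (hsd : 0 ≤ sd)  -- hsd feeds pvStart_succ
    (hib : i < b) (hn : floor * b + sd = n) :
    pvStart floor sd i + pvLen floor sd i ≤ n := by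
  rw [← pvStart_succ floor sd i hsd]
  unfold pvStart
  have h1 : (i + 1) * floor ≤ b * floor :=
    mul_le_mul_of_nonneg_right (by omega) hfloor
  have h2 : min (i + 1) sd ≤ sd := min_le_right _ _
  nlinarith [h1, h2]

lemma pvFold (items : List Int) (n b floor sd : Int)
    (hb : 0 < b) (hbn : b ≤ n)
    (hfloor : 0 ≤ floor) (hsd : 0 ≤ sd) (hn : floor * b + sd = n) :
    ∀ (k : Nat) (a : Int) (acc : List (List Int)), 0 ≤ a → a + (k : Int) = b →
    ((PySem.List.pyRange a b 1).foldl
      (fun (st : List Int × List (List Int)) x_i =>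
        (st.1.drop (if x_i < sd then floor + 1 else floor).toNat,
         st.2 ++ [st.1.take (if x_i < sd then floor + 1 else floor).toNat]))
      (items.drop (pvStart floor sd a).toNat, acc)).2
    = acc ++ (PySem.List.pyRange a b 1).map (fun i =>
        PySem.List.slice (items.take n.toNat) (some (pvStart floor sd i))
          (some (pvStart floor sd i + (if i < sd then floor + 1 else floor)))) := by
  intro k
  induction k with
  | zero =>
    intro a acc ha hab
    rw [PySem.List.pyRange_one_eq_nil (by omega)]
    simp
  | succ m ih =>
    intro a acc ha hab
    have hab' : a < b := by omega
    rw [PySem.List.pyRange_one_cons hab']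
    have hstart_nonneg : 0 ≤ pvStart floor sd a := by
      unfold pvStart
      have : 0 ≤ a * floor := mul_nonneg ha hfloor
      have : 0 ≤ min a sd := le_min ha hsd
      omega
    have hlen_nonneg : 0 ≤ pvLen floor sd a := by unfold pvLen; split <;> omega
    have hbound : pvStart floor sd a + pvLen floor sd a ≤ n :=
      pvStart_add_len_le floor sd a b n hfloor hsd hab' hn
    -- the chunk A takes equals B's slice of the materialized prefix
    have hchunk :
        (items.drop (pvStart floor sd a).toNat).take (pvLen floor sd a).toNat
        = PySem.List.slice (items.take n.toNat) (some (pvStart floor sd a))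
            (some (pvStart floor sd a + (if a < sd then floor + 1 else floor))) := by
      have hL : (if a < sd then floor + 1 else floor) = pvLen floor sd a := rfl
      rw [hL, PySem.List.slice_toNat _ hstart_nonneg (by omega)]
      have ht : (pvStart floor sd a + pvLen floor sd a).toNat - (pvStart floor sd a).toNat
          = (pvLen floor sd a).toNat := by omega
      rw [ht, List.drop_take]
      rw [List.take_take]
      congr 1
      omega
    -- the remaining-iterator state after one step is the next drop
    have hdrop :
        (items.drop (pvStart floor sd a).toNat).drop (pvLen floor sd a).toNat
        = items.drop (pvStart floor sd (a + 1)).toNat := by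
      rw [List.drop_drop, pvStart_succ floor sd a hsd]
      congr 1
      omega
    simp only [List.foldl_cons, List.map_cons]
    simp only [pvLen] at hchunk hdrop
    rw [hdrop, hchunk]
    rw [ih (a + 1) _ (by omega) (by push_cast at hab ⊢; omega)]
    simp

-- ===== VERDICT (by name: the statement is the Claim_ definition above) =====
theorem getchunks_cont_spec : Claim_equal_getchunks_cont := by
  intro items maxbaskets item_count _ hpre
  unfold Spec_getchunks_cont getchunks_cont getchunks_cont_alt
  obtain ⟨hne, hle⟩ := hpre
  dsimp only
  set n := pvEffCount items item_count with hn
  set b := min n maxbaskets with hbdef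
  rw [if_neg hne, if_neg hne]
  rcases lt_or_gt_of_ne hne with hneg | hpos
  · -- baskets < 0: both sides are the empty range
    rw [PySem.List.pyRange_one_eq_nil (by omega)]
    simp
  · -- baskets > 0
    have hbn : b ≤ n := min_le_left _ _
    have hfloor : 0 ≤ PySem.Int.floordiv n b := by
      have := (PySem.Int.le_floordiv_iff_mul_le (a := n) (b := b) (q := 0) hpos).mpr (by omega)
      omega
    have hsd : 0 ≤ PySem.Int.mod n b := PySem.Int.mod_nonneg _ hpos
    have hmul : PySem.Int.floordiv n b * b + PySem.Int.mod n b = n :=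
      PySem.Int.floordiv_mul_add_mod n b
    rw [if_pos hpos, PySem.List.slice_to _ (by omega : (0:Int) ≤ n)]
    have h0 : pvStart (PySem.Int.floordiv n b) (PySem.Int.mod n b) 0 = 0 := by
      unfold pvStart
      rw [min_eq_left hsd]
      ring
    have hfold := pvFold items n b (PySem.Int.floordiv n b) (PySem.Int.mod n b)
      hpos hbn hfloor hsd hmul b.toNat 0 [] le_rfl (by omega)
    rw [h0] at hfold
    simpa [pvStart] using hfold
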